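-- pv_equiv track=rewrite | github.com/egeulgen/Bioinformatics_Specialization | Bioinformatics III/Week V/SharedKmers.py | SharedKmers
-- ===== SOURCE A (Python) =====
-- def reverse_comp(Seq):
--     return Seq[::-1].translate(Seq.maketrans('ATCG', 'TAGC'))
--
-- def SharedKmers(k, seq1, seq2):
--     result = []
--     seq1dict = {}
--     for i in range(len(seq1) - k + 1):
--         key = seq1[i:i+k]
--         if key in seq1dict.keys():
--             seq1dict[key].append(i)
--         elif reverse_comp(key) in seq1dict.keys():
--             seq1dict[reverse_comp(key)].append(i)
--         else:
--             seq1dict[key] = [i]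
--     for j in range(len(seq2) - k + 1):
--         sub2 = seq2[j:j+k]
--         if sub2 in seq1dict.keys():
--             for pos in seq1dict[sub2]:
--                 result.append([pos, j])
--         elif reverse_comp(sub2) in seq1dict.keys():
--             for pos in seq1dict[reverse_comp(sub2)]:
--                 result.append([pos, j])
--     return result
-- ===== SOURCE B (Python) =====
-- def reverse_comp(Seq):
--     return Seq[::-1].translate(Seq.maketrans('ATCG', 'TAGC'))
--
-- def SharedKmers(k, seq1, seq2):
--     result = []
--     for j in range(len(seq2) - k + 1):
--         sub2 = seq2[j:j+k]
--         rc = reverse_comp(sub2)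
--         for i in range(len(seq1) - k + 1):
--             s = seq1[i:i+k]
--             if s == sub2 or s == rc:
--                 result.append([i, j])
--     return result
-- ===== Notes on version B (the rewrite author's own statement) =====
-- stated objective: alternative
-- what changed: B drops A's grouping hash index over seq1 k-mers entirely: for every seq2 position it computes the k-mer and its reverse complement once and re-scans all seq1 positions directly, appending matches, instead of A's build-dict-then-lookup with reverse-complement key unification.
import Mathlib
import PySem

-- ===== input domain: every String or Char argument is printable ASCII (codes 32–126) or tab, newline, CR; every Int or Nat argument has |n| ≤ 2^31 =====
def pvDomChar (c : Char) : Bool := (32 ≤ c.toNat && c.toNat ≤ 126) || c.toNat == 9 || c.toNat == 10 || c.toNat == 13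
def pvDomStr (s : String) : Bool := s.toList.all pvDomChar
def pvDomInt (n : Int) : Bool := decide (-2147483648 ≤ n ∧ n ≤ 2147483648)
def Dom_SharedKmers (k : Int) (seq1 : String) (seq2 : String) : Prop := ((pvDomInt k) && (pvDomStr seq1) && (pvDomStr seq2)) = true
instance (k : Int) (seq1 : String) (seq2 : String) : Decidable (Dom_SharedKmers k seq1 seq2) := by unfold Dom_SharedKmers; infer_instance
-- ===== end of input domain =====

-- B drops A's hash index over seq1: for each seq2 position it re-scans seq1 directly,
-- matching each seq1 k-mer against the seq2 k-mer or its reverse complement (objective: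
-- alternative — no table maintained, a repeated-scan pass of similar cost on small k-mers).

-- ===== PORT A =====
-- reverse_comp: Seq[::-1].translate(maketrans('ATCG','TAGC')) — ported by hand, exact:
-- reversal then the character substitution A↔T, C↔G, all other characters unchanged.
def pvComp (c : Char) : Char :=
  if c = 'A' then 'T' else if c = 'T' then 'A'
  else if c = 'C' then 'G' else if c = 'G' then 'C' else c

def pvRC (s : List Char) : List Char := (s.reverse).map pvComp

-- body of A's first loop: build seq1dict (keys in seq1dict.keys() ↔ Dict.contains)
def pvStep (k : Int) (s1 : List Char) (d : PySem.Dict (List Char) (List Int)) (i : Int) :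
    PySem.Dict (List Char) (List Int) :=
  let key := PySem.List.slice s1 (some i) (some (i + k))
  if d.contains key then d.modify key [] (fun l => l ++ [i])
  else if d.contains (pvRC key) then d.modify (pvRC key) [] (fun l => l ++ [i])
  else d.insert key [i]

def SharedKmers (k : Int) (seq1 : String) (seq2 : String) : List (List Int) :=
  let s1 := seq1.toList
  let s2 := seq2.toList
  let d := (PySem.List.pyRange 0 (PySem.Str.len seq1 - k + 1) 1).foldl (pvStep k s1) PySem.Dict.empty
  (PySem.List.pyRange 0 (PySem.Str.len seq2 - k + 1) 1).foldl (fun result j =>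
    let sub2 := PySem.List.slice s2 (some j) (some (j + k))
    if d.contains sub2 then result ++ (d.getD sub2 []).map (fun pos => [pos, j])
    else if d.contains (pvRC sub2) then result ++ (d.getD (pvRC sub2) []).map (fun pos => [pos, j])
    else result) []

-- ===== PORT B =====
def SharedKmers_alt (k : Int) (seq1 : String) (seq2 : String) : List (List Int) :=
  let s1 := seq1.toList
  let s2 := seq2.toList
  (PySem.List.pyRange 0 (PySem.Str.len seq2 - k + 1) 1).foldl (fun result j =>
    let sub2 := PySem.List.slice s2 (some j) (some (j + k))
    let rc := pvRC sub2
    (PySem.List.pyRange 0 (PySem.Str.len seq1 - k + 1) 1).foldl (fun result i =>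
      let s := PySem.List.slice s1 (some i) (some (i + k))
      if s = sub2 ∨ s = rc then result ++ [[i, j]] else result) result) []

-- ===== PRECONDITION & SPEC =====
def Spec_SharedKmers (k : Int) (seq1 : String) (seq2 : String) (out : List (List Int)) : Prop := out = SharedKmers_alt k seq1 seq2
instance (k : Int) (seq1 : String) (seq2 : String) (out : List (List Int)) : Decidable (Spec_SharedKmers k seq1 seq2 out) := by unfold Spec_SharedKmers; infer_instance

-- ===== CLAIM (what is proved, stated in full; the proofs are below) =====
def Claim_equal_SharedKmers : Prop := ∀ (k : Int) (seq1 : String) (seq2 : String), Dom_SharedKmers k seq1 seq2 → Spec_SharedKmers k seq1 seq2 (SharedKmers k seq1 seq2)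

-- ===== LEMMAS AND PROOFS =====

lemma pvComp_comp (c : Char) : pvComp (pvComp c) = c := by
  unfold pvComp; split_ifs <;> simp_all

lemma pvRC_rc (s : List Char) : pvRC (pvRC s) = s := by
  simp only [pvRC, List.map_reverse, List.reverse_reverse, List.map_map]
  calc s.map (pvComp ∘ pvComp) = s.map id := List.map_congr_left (fun x _ => pvComp_comp x)
    _ = s := List.map_id s

lemma pvRC_inj {s t : List Char} (h : pvRC s = pvRC t) : s = t := by
  have h2 := congrArg pvRC h
  rwa [pvRC_rc, pvRC_rc] at h2

-- how A's second loop reads seq1dict: the group of positions stored for a k-mer S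
def pvLookup (d : PySem.Dict (List Char) (List Int)) (S : List Char) : List Int :=
  if d.contains S then d.getD S []
  else if d.contains (pvRC S) then d.getD (pvRC S) [] else []

-- invariant of A's dict: a key and its reverse complement never coexist as distinct keys
def pvInv (d : PySem.Dict (List Char) (List Int)) : Prop :=
  ∀ S : List Char, d.contains S = true → d.contains (pvRC S) = true → pvRC S = S

lemma pvContains_modify (d : PySem.Dict (List Char) (List Int)) (m X : List Char)
    (hm : d.contains m = true) (f : List Int → List Int) :
    (d.modify m [] f).contains X = d.contains X := by
  rw [PySem.Dict.contains_modify]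
  by_cases h : X = m
  · subst h; simp [hm]
  · simp [h]

lemma pvGetD_modify (d : PySem.Dict (List Char) (List Int)) (m X : List Char)
    (f : List Int → List Int) :
    (d.modify m [] f).getD X [] = if X = m then f (d.getD m []) else d.getD X [] := by
  by_cases h : X = m
  · subst h; simp [PySem.Dict.getD_modify_self]
  · simp [h, PySem.Dict.getD_modify_of_ne d [] f h]

lemma pvLookup_modify (d : PySem.Dict (List Char) (List Int)) (hInv : pvInv d)
    (m : List Char) (hm : d.contains m = true) (i : Int) (S : List Char) :
    pvLookup (d.modify m [] (fun l => l ++ [i])) S =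
      pvLookup d S ++ (if m = S ∨ m = pvRC S then [i] else []) := by
  unfold pvLookup
  rw [pvContains_modify d m S hm, pvContains_modify d m _ hm,
    pvGetD_modify d m S, pvGetD_modify d m (pvRC S)]
  by_cases c1 : d.contains S = true
  · rw [if_pos c1, if_pos c1]
    by_cases h1 : S = m
    · subst h1; rw [if_pos rfl, if_pos (Or.inl rfl)]
    · have h2 : ¬ m = pvRC S := by
        intro h
        have := hInv S c1 (by rw [← h]; exact hm)
        exact h1 (by rw [this] at h; exact h.symm)
      rw [if_neg h1, if_neg (by rintro (h | h); exact h1 h.symm; exact h2 h)]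
      simp
  · rw [if_neg c1, if_neg c1]
    have hmS : ¬ m = S := fun h => c1 (h ▸ hm)
    by_cases c2 : d.contains (pvRC S) = true
    · rw [if_pos c2, if_pos c2]
      by_cases h1 : pvRC S = m
      · rw [if_pos h1, if_pos (Or.inr h1.symm), h1]
      · rw [if_neg h1, if_neg (by rintro (h | h); exact hmS h; exact h1 h.symm)]
        simp
    · rw [if_neg c2, if_neg c2]
      have hmR : ¬ m = pvRC S := fun h => c2 (h ▸ hm)
      rw [if_neg (by rintro (h | h); exact hmS h; exact hmR h)]
      simp

lemma pvInv_step (k : Int) (s1 : List Char) (d : PySem.Dict (List Char) (List Int))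
    (hInv : pvInv d) (i : Int) : pvInv (pvStep k s1 d i) := by
  unfold pvStep
  set key := PySem.List.slice s1 (some i) (some (i + k)) with hkey
  by_cases hc : d.contains key = true
  · rw [if_pos hc]
    intro S hS hR
    rw [pvContains_modify d key S hc] at hS
    rw [pvContains_modify d key _ hc] at hR
    exact hInv S hS hR
  · rw [if_neg hc]
    by_cases hr : d.contains (pvRC key) = true
    · rw [if_pos hr]
      intro S hS hR
      rw [pvContains_modify d _ S hr] at hS
      rw [pvContains_modify d _ _ hr] at hR
      exact hInv S hS hR
    · rw [if_neg hr]
      intro S hS hR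
      rw [PySem.Dict.contains_insert] at hS hR
      rcases Bool.or_eq_true_iff.mp hS with h1 | h1 <;>
        rcases Bool.or_eq_true_iff.mp hR with h2 | h2
      · have e1 : S = key := by simpa using h1
        have e2 : pvRC S = key := by simpa using h2
        rw [e1] at e2 ⊢
        exact e2
      · have e1 : S = key := by simpa using h1
        exact absurd (e1 ▸ h2) (by simp [hr])
      · have e2 : pvRC S = key := by simpa using h2
        have e3 : S = pvRC key := by rw [← e2, pvRC_rc]
        exact absurd (e3 ▸ h1) (by simp [hr])
      · exact hInv S h1 h2

lemma pvLookup_step (k : Int) (s1 : List Char) (d : PySem.Dict (List Char) (List Int))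
    (hInv : pvInv d) (i : Int) (S : List Char) :
    pvLookup (pvStep k s1 d i) S = pvLookup d S ++
      (if PySem.List.slice s1 (some i) (some (i + k)) = S ∨
          PySem.List.slice s1 (some i) (some (i + k)) = pvRC S then [i] else []) := by
  unfold pvStep
  set key := PySem.List.slice s1 (some i) (some (i + k)) with hkey
  by_cases hc : d.contains key = true
  · rw [if_pos hc]
    exact pvLookup_modify d hInv key hc i S
  · rw [if_neg hc]
    by_cases hr : d.contains (pvRC key) = true
    · rw [if_pos hr, pvLookup_modify d hInv (pvRC key) hr i S]
      congr 1
      have hiff : (pvRC key = S ∨ pvRC key = pvRC S) ↔ (key = S ∨ key = pvRC S) := by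
        constructor
        · rintro (h | h)
          · exact Or.inr (by rw [← h, pvRC_rc])
          · exact Or.inl (pvRC_inj h)
        · rintro (h | h)
          · exact Or.inr (congrArg pvRC h)
          · exact Or.inl (by rw [h, pvRC_rc])
      by_cases h : key = S ∨ key = pvRC S
      · rw [if_pos (hiff.mpr h), if_pos h]
      · rw [if_neg (fun hh => h (hiff.mp hh)), if_neg h]
    · -- fresh key inserted
      rw [if_neg hr]
      unfold pvLookup
      have hc' : d.contains key = false := by simpa using hc
      have hr' : d.contains (pvRC key) = false := by simpa using hr
      have hcR : d.contains (pvRC (pvRC key)) = false := by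
        rw [pvRC_rc]; exact hc'
      by_cases h1 : key = S
      · subst h1
        simp only [PySem.Dict.contains_insert]
        rw [if_pos (by simp), PySem.Dict.getD_insert_self,
          if_neg (by simp [hc']), if_neg (by simp [hr'])]
        simp
      · by_cases h2 : key = pvRC S
        · have hSk : S = pvRC key := by rw [h2, pvRC_rc]
          have hne : ¬ pvRC key = key := fun h => h1 (by rw [hSk, h])
          subst hSk
          simp only [PySem.Dict.contains_insert]
          rw [pvRC_rc]
          rw [if_neg (by simp [hne, hr']), if_pos (by simp), PySem.Dict.getD_insert_self,
            if_neg (by simp [hr']), if_neg (by simp [hc']), if_pos (Or.inr rfl)]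
          simp
        · have e1 : ¬ S = key := fun h => h1 h.symm
          have e2 : ¬ pvRC S = key := fun h => h2 h.symm
          simp only [PySem.Dict.contains_insert]
          rw [PySem.Dict.getD_insert_of_ne d _ [] e1, PySem.Dict.getD_insert_of_ne d _ [] e2]
          by_cases c1 : d.contains S = true
          · simp [c1, h1, h2]
          · by_cases c2 : d.contains (pvRC S) = true
            · simp [e1, c1, c2, h1, h2]
            · simp [e1, e2, c1, c2, h1, h2]

lemma pvFold (k : Int) (s1 : List Char) (xs : List Int)
    (d : PySem.Dict (List Char) (List Int)) (hInv : pvInv d) :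
    pvInv (xs.foldl (pvStep k s1) d) ∧ ∀ S : List Char,
      pvLookup (xs.foldl (pvStep k s1) d) S = pvLookup d S ++
        xs.filter (fun i => decide (PySem.List.slice s1 (some i) (some (i + k)) = S ∨
          PySem.List.slice s1 (some i) (some (i + k)) = pvRC S)) := by
  induction xs generalizing d with
  | nil => exact ⟨hInv, fun S => by simp⟩
  | cons i xs ih =>
    obtain ⟨hI, hL⟩ := ih (pvStep k s1 d i) (pvInv_step k s1 d hInv i)
    refine ⟨hI, fun S => ?_⟩
    rw [List.foldl_cons, hL S, pvLookup_step k s1 d hInv i S, List.filter_cons,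
      List.append_assoc]
    split_ifs <;> simp_all

lemma pvEmpty_inv : pvInv (PySem.Dict.empty : PySem.Dict (List Char) (List Int)) := by
  intro S hS _; rw [PySem.Dict.contains_empty] at hS; cases hS

lemma pvLookup_empty (S : List Char) :
    pvLookup (PySem.Dict.empty : PySem.Dict (List Char) (List Int)) S = [] := by
  simp [pvLookup, PySem.Dict.contains_empty]

-- ===== VERDICT (by name: the statement is the Claim_ definition above) =====
theorem SharedKmers_spec : Claim_equal_SharedKmers := by
  intro k seq1 seq2 _
  unfold Spec_SharedKmers SharedKmers SharedKmers_alt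
  set s1 := seq1.toList
  set s2 := seq2.toList
  set I := PySem.List.pyRange 0 (PySem.Str.len seq1 - k + 1) 1 with hI
  set J := PySem.List.pyRange 0 (PySem.Str.len seq2 - k + 1) 1 with hJ
  set d := I.foldl (pvStep k s1) PySem.Dict.empty with hd
  obtain ⟨_, hL⟩ := pvFold k s1 I PySem.Dict.empty pvEmpty_inv
  -- A's second loop appends exactly pvLookup's group for every j
  have hA : J.foldl (fun result j =>
      let sub2 := PySem.List.slice s2 (some j) (some (j + k))
      if d.contains sub2 then result ++ (d.getD sub2 []).map (fun pos => [pos, j])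
      else if d.contains (pvRC sub2) then result ++ (d.getD (pvRC sub2) []).map (fun pos => [pos, j])
      else result) [] = J.foldl (fun result j =>
        result ++ (pvLookup d (PySem.List.slice s2 (some j) (some (j + k)))).map
          (fun pos => [pos, j])) [] := by
    apply PySem.List.foldl_congr_mem
    intro acc j _
    simp only [pvLookup]
    split_ifs <;> simp
  rw [hA, PySem.List.foldl_append_eq_flatMap]
  -- B's inner loop is filter-then-map over seq1 positions
  have hB : ∀ (res : List (List Int)) (j : Int),
      I.foldl (fun result i =>
        let s := PySem.List.slice s1 (some i) (some (i + k))
        if s = PySem.List.slice s2 (some j) (some (j + k)) ∨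
           s = pvRC (PySem.List.slice s2 (some j) (some (j + k))) then result ++ [[i, j]]
        else result) res = res ++
        ((I.filter (fun i => decide (PySem.List.slice s1 (some i) (some (i + k)) =
            PySem.List.slice s2 (some j) (some (j + k)) ∨
          PySem.List.slice s1 (some i) (some (i + k)) =
            pvRC (PySem.List.slice s2 (some j) (some (j + k)))))).map (fun i => [i, j])) := by
    intro res j
    exact PySem.List.foldl_append_ite _ (fun i => [i, j]) I res
  have hB' : J.foldl (fun result j =>
      let sub2 := PySem.List.slice s2 (some j) (some (j + k))
      let rc := pvRC sub2
      I.foldl (fun result i =>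
        let s := PySem.List.slice s1 (some i) (some (i + k))
        if s = sub2 ∨ s = rc then result ++ [[i, j]] else result) result) [] =
      J.foldl (fun result j =>
        result ++ ((I.filter (fun i => decide (PySem.List.slice s1 (some i) (some (i + k)) =
            PySem.List.slice s2 (some j) (some (j + k)) ∨
          PySem.List.slice s1 (some i) (some (i + k)) =
            pvRC (PySem.List.slice s2 (some j) (some (j + k)))))).map (fun i => [i, j]))) [] := by
    apply PySem.List.foldl_congr_mem
    intro acc j _
    exact hB acc j
  rw [hB', PySem.List.foldl_append_eq_flatMap]
  simp only [List.nil_append]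
  apply List.flatMap_congr  -- pointwise equality of the per-j blocks
  intro j _
  rw [hL]
  simp [pvLookup_empty]
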